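-- pv_equiv track=rewrite | github.com/mrdefenestrator/finances | finances/filters.py | apply_budget_filters
-- ===== SOURCE A (Python) =====
-- from typing import Any, Dict, List
--
-- def apply_budget_filters(
--     budget: List[Dict[str, Any]],
--     include_kinds: List[str] | None = None,
--     include_types: List[str] | None = None,
--     exclude_types: List[str] | None = None,
--     include_recurrence: List[str] | None = None,
--     exclude_recurrence: List[str] | None = None,
-- ) -> List[Dict[str, Any]]:
--     """Apply kind, type, and recurrence filters to unified budget list. Returns filtered list."""
--     result = list(budget)
--     if include_kinds:
--         kinds_set = set(k.lower() for k in include_kinds)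
--         result = [e for e in result if e.get("kind", "").lower() in kinds_set]
--     if include_types:
--         include_set = set(include_types)
--         result = [e for e in result if e.get("type") in include_set]
--     if exclude_types:
--         exclude_set = set(exclude_types)
--         result = [e for e in result if e.get("type") not in exclude_set]
--     if include_recurrence:
--         rec_set = set(include_recurrence)
--         result = [e for e in result if e.get("recurrence") in rec_set]
--     if exclude_recurrence:
--         rec_set = set(exclude_recurrence)
--         result = [e for e in result if e.get("recurrence") not in rec_set]
--     return result
-- ===== SOURCE B (Python) =====
-- from typing import Any, Dict, List
--
-- def apply_budget_filters(
--     budget: "List[Dict[str, Any]]",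
--     include_kinds=None,
--     include_types=None,
--     exclude_types=None,
--     include_recurrence=None,
--     exclude_recurrence=None,
-- ):
--     """Single pass: build the active filter sets once, then one comprehension."""
--     kinds = {k.lower() for k in include_kinds} if include_kinds else None
--     inc_t = set(include_types) if include_types else None
--     exc_t = set(exclude_types) if exclude_types else None
--     inc_r = set(include_recurrence) if include_recurrence else None
--     exc_r = set(exclude_recurrence) if exclude_recurrence else None
--
--     def keep(e):
--         if kinds is not None and e.get("kind", "").lower() not in kinds:
--             return False
--         if inc_t is not None and e.get("type") not in inc_t:
--             return False
--         if exc_t is not None and e.get("type") in exc_t: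
--             return False
--         if inc_r is not None and e.get("recurrence") not in inc_r:
--             return False
--         if exc_r is not None and e.get("recurrence") in exc_r:
--             return False
--         return True
--
--     return [e for e in budget if keep(e)]
-- ===== Notes on version B (the rewrite author's own statement) =====
-- stated objective: simpler
-- what changed: A rebuilds the whole list up to five times, one pass per active filter; B precomputes the active filter sets once and makes a single pass over the budget with one combined predicate.
import Mathlib
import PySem

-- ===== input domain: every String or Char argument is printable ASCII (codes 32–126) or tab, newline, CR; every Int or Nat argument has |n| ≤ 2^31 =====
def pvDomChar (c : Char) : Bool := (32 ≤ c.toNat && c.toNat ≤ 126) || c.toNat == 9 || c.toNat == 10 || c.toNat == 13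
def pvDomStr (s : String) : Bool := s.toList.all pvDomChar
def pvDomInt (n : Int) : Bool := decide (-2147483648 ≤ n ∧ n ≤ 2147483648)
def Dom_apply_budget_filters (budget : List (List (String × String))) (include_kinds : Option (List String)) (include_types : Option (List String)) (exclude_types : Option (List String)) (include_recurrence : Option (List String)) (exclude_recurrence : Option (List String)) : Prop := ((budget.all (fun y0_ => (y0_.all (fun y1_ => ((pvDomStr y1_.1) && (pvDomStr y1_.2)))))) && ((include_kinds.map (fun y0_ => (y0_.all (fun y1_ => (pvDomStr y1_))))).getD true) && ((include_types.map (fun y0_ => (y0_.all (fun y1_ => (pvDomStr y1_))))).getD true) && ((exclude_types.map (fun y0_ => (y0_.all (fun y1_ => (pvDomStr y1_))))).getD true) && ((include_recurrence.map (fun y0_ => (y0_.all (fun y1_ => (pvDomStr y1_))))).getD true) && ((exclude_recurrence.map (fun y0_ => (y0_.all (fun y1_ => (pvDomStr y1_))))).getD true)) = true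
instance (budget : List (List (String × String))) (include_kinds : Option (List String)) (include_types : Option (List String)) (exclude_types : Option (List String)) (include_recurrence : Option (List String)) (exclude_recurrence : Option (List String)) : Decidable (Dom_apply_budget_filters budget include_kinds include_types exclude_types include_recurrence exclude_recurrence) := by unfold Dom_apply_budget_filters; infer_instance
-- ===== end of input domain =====

-- B replaces A's five sequential list rebuilds by precomputing the active filter
-- sets once and making a single pass with one combined predicate (objective: simpler).

-- e.get(key) / e.get(key, default) on an entry dict
def pvGet? (e : List (String × String)) (k : String) : Option String :=
  PySem.Dict.get? (PySem.Dict.mk e) k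

-- ===== PORT A =====
def apply_budget_filters (budget : List (List (String × String))) (include_kinds : Option (List String)) (include_types : Option (List String)) (exclude_types : Option (List String)) (include_recurrence : Option (List String)) (exclude_recurrence : Option (List String)) : List (List (String × String)) :=
  let result := budget
  -- if include_kinds:
  let result := match include_kinds with
    | some ks =>
        if ks.isEmpty then result else
          let kinds_set : PySem.Set String := PySem.Set.ofList (ks.map PySem.Str.lower)
          result.filter (fun e => PySem.Set.contains kinds_set (PySem.Str.lower ((pvGet? e "kind").getD "")))
    | none => result
  -- if include_types:
  let result := match include_types with
    | some ts =>
        if ts.isEmpty then result else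
          let include_set : PySem.Set String := PySem.Set.ofList ts
          result.filter (fun e => match pvGet? e "type" with
            | some v => PySem.Set.contains include_set v
            | none => false)
    | none => result
  -- if exclude_types:
  let result := match exclude_types with
    | some ts =>
        if ts.isEmpty then result else
          let exclude_set : PySem.Set String := PySem.Set.ofList ts
          result.filter (fun e => match pvGet? e "type" with
            | some v => !(PySem.Set.contains exclude_set v)
            | none => true)
    | none => result
  -- if include_recurrence:
  let result := match include_recurrence with
    | some rs =>
        if rs.isEmpty then result else
          let rec_set : PySem.Set String := PySem.Set.ofList rs
          result.filter (fun e => match pvGet? e "recurrence" with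
            | some v => PySem.Set.contains rec_set v
            | none => false)
    | none => result
  -- if exclude_recurrence:
  let result := match exclude_recurrence with
    | some rs =>
        if rs.isEmpty then result else
          let rec_set : PySem.Set String := PySem.Set.ofList rs
          result.filter (fun e => match pvGet? e "recurrence" with
            | some v => !(PySem.Set.contains rec_set v)
            | none => true)
    | none => result
  result

-- ===== PORT B =====
-- 'set(xs) if xs else None'
def pvActive (o : Option (List String)) : Option (PySem.Set String) :=
  match o with
  | some xs => if xs.isEmpty then none else some (PySem.Set.ofList xs)
  | none => none

-- 'o is not None and e.get(key) not in o'  (for include filters; missing key not in set)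
def pvFailsInc (o : Option (PySem.Set String)) (v : Option String) : Bool :=
  match o with
  | some s => !(match v with | some x => PySem.Set.contains s x | none => false)
  | none => false

-- 'o is not None and e.get(key) in o'  (for exclude filters)
def pvFailsExc (o : Option (PySem.Set String)) (v : Option String) : Bool :=
  match o with
  | some s => (match v with | some x => PySem.Set.contains s x | none => false)
  | none => false

def apply_budget_filters_alt (budget : List (List (String × String))) (include_kinds : Option (List String)) (include_types : Option (List String)) (exclude_types : Option (List String)) (include_recurrence : Option (List String)) (exclude_recurrence : Option (List String)) : List (List (String × String)) :=
  let kinds : Option (PySem.Set String) :=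
    match include_kinds with
    | some ks => if ks.isEmpty then none else some (PySem.Set.ofList (ks.map PySem.Str.lower))
    | none => none
  let inc_t := pvActive include_types
  let exc_t := pvActive exclude_types
  let inc_r := pvActive include_recurrence
  let exc_r := pvActive exclude_recurrence
  let keep : List (String × String) → Bool := fun e =>
    if pvFailsInc kinds (some (PySem.Str.lower ((pvGet? e "kind").getD ""))) then false
    else if pvFailsInc inc_t (pvGet? e "type") then false
    else if pvFailsExc exc_t (pvGet? e "type") then false
    else if pvFailsInc inc_r (pvGet? e "recurrence") then false
    else if pvFailsExc exc_r (pvGet? e "recurrence") then false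
    else true
  budget.filter keep

-- ===== PRECONDITION & SPEC =====
def Spec_apply_budget_filters (budget : List (List (String × String))) (include_kinds : Option (List String)) (include_types : Option (List String)) (exclude_types : Option (List String)) (include_recurrence : Option (List String)) (exclude_recurrence : Option (List String)) (out : List (List (String × String))) : Prop := out = apply_budget_filters_alt budget include_kinds include_types exclude_types include_recurrence exclude_recurrence
instance (budget : List (List (String × String))) (include_kinds : Option (List String)) (include_types : Option (List String)) (exclude_types : Option (List String)) (include_recurrence : Option (List String)) (exclude_recurrence : Option (List String)) (out : List (List (String × String))) : Decidable (Spec_apply_budget_filters budget include_kinds include_types exclude_types include_recurrence exclude_recurrence out) := by unfold Spec_apply_budget_filters; infer_instance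

-- ===== CLAIM (what is proved, stated in full; the proofs are below) =====
def Claim_equal_apply_budget_filters : Prop := ∀ (budget : List (List (String × String))) (include_kinds : Option (List String)) (include_types : Option (List String)) (exclude_types : Option (List String)) (include_recurrence : Option (List String)) (exclude_recurrence : Option (List String)), Dom_apply_budget_filters budget include_kinds include_types exclude_types include_recurrence exclude_recurrence → Spec_apply_budget_filters budget include_kinds include_types exclude_types include_recurrence exclude_recurrence (apply_budget_filters budget include_kinds include_types exclude_types include_recurrence exclude_recurrence)

-- ===== LEMMAS AND PROOFS =====

-- Each of A's conditional rebuild stages is a single filter by a total predicate.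
def pvStagePred (o : Option (List String)) (p : List String → List (String × String) → Bool) :
    List (String × String) → Bool :=
  match o with
  | some ks => if ks.isEmpty then (fun _ => true) else p ks
  | none => fun _ => true

theorem pv_filter_of_stage (o : Option (List String)) (p : List String → List (String × String) → Bool)
    (r : List (List (String × String))) :
    (match o with
      | some ks => if ks.isEmpty then r else r.filter (p ks)
      | none => r)
      = r.filter (pvStagePred o p) := by
  cases o with
  | none => simp [pvStagePred]
  | some ks =>
      by_cases h : ks.isEmpty <;> simp [pvStagePred, h]

theorem pv_kind_eq (o : Option (List String)) (h : List (String × String) → String) (e : List (String × String)) :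
    pvStagePred o (fun ks e => (PySem.Set.ofList (ks.map PySem.Str.lower)).contains (h e)) e
      = !pvFailsInc (match o with
          | some ks => if ks.isEmpty then none else some (PySem.Set.ofList (ks.map PySem.Str.lower))
          | none => none) (some (h e)) := by
  cases o with
  | none => rfl
  | some ks => by_cases hk : ks.isEmpty <;> simp [pvStagePred, pvFailsInc, hk]

theorem pv_inc_eq (o : Option (List String)) (h : List (String × String) → Option String) (e : List (String × String)) :
    pvStagePred o (fun ts e => match h e with
      | some x => (PySem.Set.ofList ts).contains x
      | none => false) e
      = !pvFailsInc (pvActive o) (h e) := by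
  cases o with
  | none => simp [pvStagePred, pvActive, pvFailsInc]
  | some ts =>
      by_cases hk : ts.isEmpty <;> simp [pvStagePred, pvActive, pvFailsInc, hk]

theorem pv_exc_eq (o : Option (List String)) (h : List (String × String) → Option String) (e : List (String × String)) :
    pvStagePred o (fun ts e => match h e with
      | some x => !(PySem.Set.ofList ts).contains x
      | none => true) e
      = !pvFailsExc (pvActive o) (h e) := by
  cases o with
  | none => simp [pvStagePred, pvActive, pvFailsExc]
  | some ts =>
      by_cases hk : ts.isEmpty <;> cases hv : h e <;>
        simp [pvStagePred, pvActive, pvFailsExc, hk, hv]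

theorem apply_budget_filters_spec_aux (budget : List (List (String × String))) (ik it et ir er : Option (List String)) :
    apply_budget_filters budget ik it et ir er = apply_budget_filters_alt budget ik it et ir er := by
  unfold apply_budget_filters apply_budget_filters_alt
  dsimp only
  rw [pv_filter_of_stage (o := ik) (p := fun ks e =>
        (PySem.Set.ofList (ks.map PySem.Str.lower)).contains (PySem.Str.lower ((pvGet? e "kind").getD ""))),
      pv_filter_of_stage (o := it) (p := fun ts e =>
        match pvGet? e "type" with
        | some v => (PySem.Set.ofList ts).contains v
        | none => false),
      pv_filter_of_stage (o := et) (p := fun ts e =>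
        match pvGet? e "type" with
        | some v => !(PySem.Set.ofList ts).contains v
        | none => true),
      pv_filter_of_stage (o := ir) (p := fun rs e =>
        match pvGet? e "recurrence" with
        | some v => (PySem.Set.ofList rs).contains v
        | none => false),
      pv_filter_of_stage (o := er) (p := fun rs e =>
        match pvGet? e "recurrence" with
        | some v => !(PySem.Set.ofList rs).contains v
        | none => true)]
  simp only [List.filter_filter]
  apply List.filter_congr
  intro e _
  rw [pv_kind_eq ik (h := fun e => PySem.Str.lower ((pvGet? e "kind").getD "")),
      pv_inc_eq it (h := fun e => pvGet? e "type"),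
      pv_exc_eq et (h := fun e => pvGet? e "type"),
      pv_inc_eq ir (h := fun e => pvGet? e "recurrence"),
      pv_exc_eq er (h := fun e => pvGet? e "recurrence")]
  generalize pvFailsInc _ (some (PySem.Str.lower ((pvGet? e "kind").getD ""))) = b1
  generalize pvFailsInc (pvActive it) (pvGet? e "type") = b2
  generalize pvFailsExc (pvActive et) (pvGet? e "type") = b3
  generalize pvFailsInc (pvActive ir) (pvGet? e "recurrence") = b4
  generalize pvFailsExc (pvActive er) (pvGet? e "recurrence") = b5
  cases b1 <;> cases b2 <;> cases b3 <;> cases b4 <;> cases b5 <;> rfl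

-- ===== VERDICT (by name: the statement is the Claim_ definition above) =====
theorem apply_budget_filters_spec : Claim_equal_apply_budget_filters := by
  intro budget ik it et ir er _
  exact apply_budget_filters_spec_aux budget ik it et ir er
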